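-- pv_equiv track=rewrite | github.com/dadabora/les5 | zad6.py | int_sort
-- ===== SOURCE A (Python) =====
-- def int_sort(z):
--     o = list(z)
--     v = '0'
-- # фильтр  отличных от цифр знаков
--     for a in o:
--
--         if a.isdigit() == False:
--             continue
--         v = v + a
--
--
--     v = int(v)
--     return v
-- ===== SOURCE B (Python) =====
-- def int_sort(z):
--     # Same result as the original, but by numeric accumulation in one fused
--     # pass: no string is built and no final int() conversion is needed.
--     acc = 0
--     for ch in z:
--         if ch.isdigit():
--             acc = acc * 10 + (ord(ch) - 48)
--     return acc
-- ===== Notes on version B (the rewrite author's own statement) =====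
-- stated objective: alternative
-- what changed: B replaces A's build-a-zero-prefixed-digit-string-then-int() with a single fused numeric accumulation (acc = acc*10 + digit value), maintaining an integer invariant instead of a concatenated string and needing no final conversion.
import Mathlib
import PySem

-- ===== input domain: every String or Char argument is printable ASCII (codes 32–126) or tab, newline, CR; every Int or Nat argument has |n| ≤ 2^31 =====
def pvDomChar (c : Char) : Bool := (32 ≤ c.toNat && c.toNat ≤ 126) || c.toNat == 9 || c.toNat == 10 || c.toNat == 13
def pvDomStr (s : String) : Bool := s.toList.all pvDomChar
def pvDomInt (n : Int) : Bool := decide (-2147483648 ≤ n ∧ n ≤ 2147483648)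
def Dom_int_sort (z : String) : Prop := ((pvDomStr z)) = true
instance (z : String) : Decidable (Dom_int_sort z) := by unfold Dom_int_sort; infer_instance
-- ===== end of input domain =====

-- B replaces A's build-a-digit-string-then-int() with a single numeric accumulation
-- pass (acc = acc*10 + digit), fusing the filter and the conversion (objective: alternative).

-- ===== PORT A =====
-- o = list(z); v = '0'; for a in o: if a.isdigit() == False: continue; v = v + a; v = int(v)
-- int(v) is ported as PySem.Int.ofChars? v; v always starts with '0' and holds only
-- digits, so ofChars? is always `some` here and the `.getD 0` default is unreachable.
def int_sort (z : String) : Int :=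
  let o : List Char := z.toList
  let v : List Char := ['0']
  let v := o.foldl (fun v a => if PySem.Chars.isdigit a = false then v else v ++ [a]) v
  (PySem.Int.ofChars? v).getD 0

-- ===== PORT B =====
-- acc = 0; for ch in z: if ch.isdigit(): acc = acc*10 + (ord(ch) - 48); return acc
def int_sort_alt (z : String) : Int :=
  z.toList.foldl
    (fun acc ch =>
      if PySem.Chars.isdigit ch then acc * 10 + ((ch.toNat : Int) - 48) else acc)
    0

-- ===== PRECONDITION & SPEC =====
def Spec_int_sort (z : String) (out : Int) : Prop := out = int_sort_alt z
instance (z : String) (out : Int) : Decidable (Spec_int_sort z out) := by unfold Spec_int_sort; infer_instance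

-- ===== CLAIM (what is proved, stated in full; the proofs are below) =====
def Claim_equal_int_sort : Prop := ∀ (z : String), Dom_int_sort z → Spec_int_sort z (int_sort z)

-- ===== LEMMAS AND PROOFS =====

theorem pysem_isdigit_eq (c : Char) : PySem.Chars.isdigit c = c.isDigit := by
  simp [PySem.Chars.isdigit, Char.isDigit, Char.le_def]
  rfl

theorem digit_not_space (c : Char) (h : c.isDigit = true) : PySem.Int.isIntSpace c = false := by
  simp [Char.isDigit] at h
  simp only [PySem.Int.isIntSpace, Bool.or_eq_false_iff, decide_eq_false_iff_not]
  refine ⟨⟨⟨⟨⟨?_, ?_⟩, ?_⟩, ?_⟩, ?_⟩, ?_⟩ <;> rintro rfl <;> simp_all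

theorem nospace_dropWhile {l : List Char} (h : ∀ c ∈ l, c.isDigit = true) :
    List.dropWhile PySem.Int.isIntSpace l = l := by
  rw [List.dropWhile_eq_self_iff]
  intro hl
  rw [digit_not_space _ (h _ (by simp))]
  simp

-- `g` is instantiated (by unification, in `ofChars_zero_digits`) with the private
-- digit-scanning helper of `PySem.Int.ofChars?`; the two equations are then `rfl`.
theorem bindgen (g : List Char → Bool → ℕ → Option ℕ)
    (hcons : ∀ c rest b a, g (c :: rest) b a =
      if c.isDigit = true then g rest true (a * 10 + (c.toNat - '0'.toNat))
      else if c = '_' ∧ b = true then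
        (match rest with
         | d :: _ => if d.isDigit = true then g rest false a else none
         | [] => none)
      else none)
    (hnil : ∀ b a, g [] b a = if b = true then some a else none)
    (ds : List Char) (h : ∀ c ∈ ds, c.isDigit = true) (a : ℕ) :
      (Option.map (fun n => n) ((g ds true a).bind (fun x : ℕ => pure ((x : ℕ) : ℤ)))) =
        some ((ds.foldl (fun x c => x * 10 + (c.toNat - '0'.toNat)) a : ℕ) : ℤ) := by
  have key : ∀ ds : List Char, (∀ c ∈ ds, c.isDigit = true) → ∀ a : ℕ,
      g ds true a = some (ds.foldl (fun x c => x * 10 + (c.toNat - '0'.toNat)) a) := by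
    intro ds
    induction ds with
    | nil => intro _ a; simp [hnil]
    | cons c rest ih =>
      intro h a
      have hc : c.isDigit = true := h c (by simp)
      rw [hcons, if_pos hc, ih (fun x hx => h x (by simp [hx]))]
      simp
  rw [key ds h a]
  rfl

-- int("0" + <digits>) = the decimal value of the digits.
theorem ofChars_zero_digits (ds : List Char) (h : ∀ c ∈ ds, c.isDigit = true) :
    PySem.Int.ofChars? ('0' :: ds) =
      some ((ds.foldl (fun x c => x * 10 + (c.toNat - '0'.toNat)) 0 : ℕ) : ℤ) := by
  have hall : ∀ c ∈ ('0' :: ds), c.isDigit = true := by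
    intro c hc; rw [List.mem_cons] at hc
    rcases hc with rfl | hc
    · decide
    · exact h _ hc
  have h1 : List.dropWhile PySem.Int.isIntSpace ('0' :: ds) = '0' :: ds :=
    nospace_dropWhile hall
  have h2 : List.dropWhile PySem.Int.isIntSpace ('0' :: ds).reverse = ('0' :: ds).reverse :=
    nospace_dropWhile (by intro c hc; exact hall _ (List.mem_reverse.mp hc))
  simp only [PySem.Int.ofChars?, h1, h2, List.reverse_reverse]
  split
  · rename_i heq; cases heq
  · rename_i heq; cases heq
  · exact bindgen _ (fun _ _ _ _ => rfl) (fun _ _ => rfl) ds h 0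

-- A's loop builds exactly '0' followed by the digit characters of z, in order.
theorem foldA_eq_filter (l : List Char) :
    l.foldl (fun v a => if PySem.Chars.isdigit a = false then v else v ++ [a]) ['0'] =
      '0' :: l.filter Char.isDigit := by
  have hfun : (fun (v : List Char) a => if PySem.Chars.isdigit a = false then v else v ++ [a]) =
      (fun v a => if Char.isDigit a = true then v ++ [id a] else v) := by
    funext v a
    rw [pysem_isdigit_eq]
    cases a.isDigit <;> simp
  rw [hfun, PySem.List.foldl_append_if Char.isDigit id l ['0']]
  simp

-- B's guarded fold over the whole list equals the unguarded fold over the filtered list.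
theorem foldB_eq_filter (l : List Char) (a : ℤ) :
    l.foldl (fun acc ch =>
        if PySem.Chars.isdigit ch then acc * 10 + ((ch.toNat : Int) - 48) else acc) a =
      (l.filter Char.isDigit).foldl (fun acc ch => acc * 10 + ((ch.toNat : Int) - 48)) a := by
  induction l generalizing a with
  | nil => rfl
  | cons c rest ih =>
    rw [List.foldl_cons]
    rw [pysem_isdigit_eq]
    cases hc : c.isDigit with
    | false => simp [hc, ih]
    | true => simp [hc, List.foldl_cons, ih]

-- Casting the ℕ-valued accumulation to ℤ gives B's ℤ-valued accumulation.
theorem cast_fold (ds : List Char) (h : ∀ c ∈ ds, c.isDigit = true) (a : ℕ) :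
    ((ds.foldl (fun x c => x * 10 + (c.toNat - '0'.toNat)) a : ℕ) : ℤ) =
      ds.foldl (fun acc ch => acc * 10 + ((ch.toNat : Int) - 48)) (a : ℤ) := by
  induction ds generalizing a with
  | nil => rfl
  | cons c rest ih =>
    have hc : c.isDigit = true := h c (by simp)
    have h48 : 48 ≤ c.toNat := by
      simp [Char.isDigit] at hc
      exact hc.1
    rw [List.foldl_cons, List.foldl_cons, ih (fun x hx => h x (by simp [hx]))]
    congr 1
    have : ('0'.toNat : ℕ) = 48 := by decide
    rw [this]
    push_cast [Nat.cast_sub h48]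
    ring

-- ===== VERDICT (by name: the statement is the Claim_ definition above) =====
theorem int_sort_spec : Claim_equal_int_sort := by
  intro z _
  simp only [Spec_int_sort, int_sort, int_sort_alt]
  rw [foldA_eq_filter, ofChars_zero_digits _ (fun c hc => (List.mem_filter.mp hc).2),
      foldB_eq_filter]
  rw [cast_fold _ (fun c hc => (List.mem_filter.mp hc).2) 0]
  rfl
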